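-- pv_equiv track=rewrite | github.com/jab/aoc-2021 | day-10/sol.py | part2
-- ===== SOURCE A (Python) =====
-- from typing import NamedTuple
--
-- closing_by_opening = {"(": ")", "{": "}", "[": "]", "<": ">"}
--
-- is_opening = closing_by_opening.__contains__
--
-- class Corrupted(NamedTuple):
--     expected: str | None
--     got: str
--
-- class Incomplete(NamedTuple):
--     stack: list[str]
--
-- class Valid(NamedTuple):
--     line: str
--
-- def analyze(line: str) -> Corrupted | Incomplete | Valid:
--     stack: list[str] = []
--     for c in line:
--         if is_opening(c):
--             stack.append(c)
--         else:
--             if not stack: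
--                 return Corrupted(expected=None, got=c)
--             if (expect := closing_by_opening[stack.pop()]) != c:
--                 return Corrupted(expected=expect, got=c)
--     if stack:
--         return Incomplete(stack)
--     return Valid(line)
--
-- def complete(i: Incomplete) -> str:
--     s = ''
--     while i.stack:
--         s += closing_by_opening[i.stack.pop()]
--     return s
--
-- part2_points_by_delim = {")": 1, "]": 2, "}": 3, ">": 4}
--
-- def part2(lines: list[str]) -> int:
--     completions = [
--         complete(i)
--         for line in lines
--         if isinstance((i:=analyze(line)), Incomplete)
--     ]
--     scores: list[int] = []
--     for completion in completions:
--         score = 0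
--         for char in completion:
--             score *= 5
--             score += part2_points_by_delim[char]
--         scores.append(score)
--     return sorted(scores)[len(scores) // 2]
-- ===== SOURCE B (Python) =====
-- def part2(lines: list[str]) -> int:
--     # Rewrite each line to its canonical residue by repeatedly deleting adjacent
--     # matched pairs; a line is incomplete iff the residue is a non-empty string of
--     # openers, and the residue (read right-to-left) directly yields the score.
--     pts = {'(': 1, '[': 2, '{': 3, '<': 4}
--     scores = []
--     for line in lines:
--         r, prev = line, None
--         while r != prev:
--             prev = r
--             for p in ("()", "[]", "{}", "<>"):
--                 r = r.replace(p, "")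
--         if r and all(ch in "([{<" for ch in r):
--             score = 0
--             for ch in reversed(r):
--                 score = score * 5 + pts[ch]
--             scores.append(score)
--     scores.sort()
--     return scores[len(scores) // 2]
-- ===== Notes on version B (the rewrite author's own statement) =====
-- stated objective: alternative
-- what changed: B replaces A's stack-machine parse (NamedTuple analyze, explicit stack, completion string) by string rewriting: each line is reduced to a canonical residue by repeatedly deleting adjacent matched pairs with str.replace until a fixpoint; a line is incomplete iff the residue is a non-empty string of openers, and the residue read right-to-left gives the score directly.
import Mathlib
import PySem

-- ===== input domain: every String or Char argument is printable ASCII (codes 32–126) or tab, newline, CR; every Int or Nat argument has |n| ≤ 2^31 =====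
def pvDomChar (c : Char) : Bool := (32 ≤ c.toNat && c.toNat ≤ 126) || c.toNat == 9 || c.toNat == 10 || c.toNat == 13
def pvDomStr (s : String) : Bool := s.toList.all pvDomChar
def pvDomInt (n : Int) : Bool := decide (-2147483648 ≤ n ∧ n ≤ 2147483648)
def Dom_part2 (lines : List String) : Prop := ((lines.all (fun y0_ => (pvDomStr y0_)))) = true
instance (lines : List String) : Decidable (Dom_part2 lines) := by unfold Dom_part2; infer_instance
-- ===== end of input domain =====

-- B replaces A's stack-machine parse (NamedTuples, explicit stack, completion string) by
-- string rewriting: each line is reduced to a canonical residue by repeatedly deleting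
-- adjacent matched pairs until a fixpoint; incomplete lines are exactly those whose
-- residue is a non-empty string of openers, scored right-to-left (objective: alternative).

-- ===== PORT A =====
-- closing_by_opening
def cboD : PySem.Dict Char Char := PySem.Dict.mk [('(', ')'), ('{', '}'), ('[', ']'), ('<', '>')]
-- part2_points_by_delim
def pbdD : PySem.Dict Char Int := PySem.Dict.mk [(')', 1), (']', 2), ('}', 3), ('>', 4)]

inductive AnalyzeRes
  | corrupted (expected : Option Char) (got : Char)
  | incomplete (stack : List Char)
  | valid (line : String)
deriving DecidableEq, Repr

-- the for-loop of analyze; the Python stack's top is the HEAD of `stack`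
-- (closing_by_opening[stack.pop()] cannot raise KeyError: the stack holds openers only,
-- so getD's default is unreachable)
def analyzeLoop (line : String) : List Char → List Char → AnalyzeRes
  | [], stack => if stack ≠ [] then .incomplete stack else .valid line
  | c :: rest, stack =>
    if (PySem.Dict.get? cboD c).isSome then   -- is_opening(c)
      analyzeLoop line rest (c :: stack)
    else
      match stack with
      | [] => .corrupted none c
      | s :: st =>
        if (PySem.Dict.get? cboD s).getD ' ' ≠ c then
          .corrupted (some ((PySem.Dict.get? cboD s).getD ' ')) c
        else analyzeLoop line rest st

def analyze (line : String) : AnalyzeRes := analyzeLoop line line.toList []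

-- the while-loop of complete; pops top-first, appends to the string s
def completeLoop : List Char → List Char → List Char
  | [], s => s
  | c :: rest, s => completeLoop rest (s ++ [(PySem.Dict.get? cboD c).getD ' '])

def part2 (lines : List String) : Int :=
  let completions := lines.filterMap (fun line =>
    match analyze line with
    | .incomplete st => some (completeLoop st [])
    | _ => none)
  let scores := completions.foldl (fun scores completion =>
    scores ++ [completion.foldl (fun score char => score * 5 + PySem.Dict.getD pbdD char 0) 0]) []
  -- sorted(scores)[len(scores) // 2]; IndexError (scores = []) excluded by Pre_part2
  PySem.List.pyGetD (PySem.List.sorted scores (fun x => x) false)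
    (PySem.Int.floordiv (scores.length : Int) 2) 0

-- ===== PORT B =====
-- pts = {'(': 1, '[': 2, '{': 3, '<': 4}
def ptsD : PySem.Dict Char Int := PySem.Dict.mk [('(', 1), ('[', 2), ('{', 3), ('<', 4)]

-- r.replace(p, "") for a two-char pattern p equals this structural deleter (proved in
-- go_eq_cancel/replace_eq_cancel below, which the port's termination proof cites)
def cancel (o c : Char) : List Char → List Char
  | [] => []
  | [x] => [x]
  | x :: y :: t => if x = o ∧ y = c then cancel o c t else x :: cancel o c (y :: t)

lemma go_eq_cancel (o c : Char) : ∀ (fuel : Nat) (l acc : List Char), l.length ≤ fuel →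
    PySem.Chars.replace.go [o, c] [] fuel l acc = acc.reverse ++ cancel o c l := by
  intro fuel
  induction fuel with
  | zero =>
    intro l acc h
    have : l = [] := List.eq_nil_of_length_eq_zero (Nat.le_zero.mp h)
    subst this; simp [PySem.Chars.replace.go, cancel]
  | succ n ih =>
    intro l acc h
    match l with
    | [] => simp [PySem.Chars.replace.go, cancel]
    | [x] =>
      have hpre : ([o, c].isPrefixOf [x]) = false := by
        simp [List.isPrefixOf]
      simp only [PySem.Chars.replace.go, hpre, Bool.false_eq_true, if_false]
      rw [ih [] (x :: acc) (Nat.zero_le n)]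
      simp [cancel]
    | x :: y :: t =>
      by_cases hm : x = o ∧ y = c
      · obtain ⟨hx, hy⟩ := hm; subst hx; subst hy
        have hpre : ([x, y].isPrefixOf (x :: y :: t)) = true := by
          simp [List.isPrefixOf]
        simp only [PySem.Chars.replace.go, hpre, if_pos, List.length_cons, List.length_nil,
          List.drop_succ_cons, List.drop_zero, List.reverse_nil, List.nil_append]
        rw [ih t acc (by simp at h; omega)]
        simp [cancel]
      · have hpre : ([o, c].isPrefixOf (x :: y :: t)) = false := by
          simp [List.isPrefixOf]; tauto
        simp only [PySem.Chars.replace.go, hpre]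
        rw [if_neg (by simp), ih (y :: t) (x :: acc) (by simp at h ⊢; omega)]
        simp [cancel, hm]

lemma replace_eq_cancel (o c : Char) (cs : List Char) :
    PySem.Chars.replace cs [o, c] [] = cancel o c cs := by
  unfold PySem.Chars.replace
  simp only [List.isEmpty_cons]
  rw [if_neg (by simp)]
  exact go_eq_cancel o c cs.length cs [] le_rfl

lemma cancel_length_le (o c : Char) : ∀ cs : List Char, (cancel o c cs).length ≤ cs.length
  | [] => by simp [cancel]
  | [x] => by simp [cancel]
  | x :: y :: t => by
    simp only [cancel]
    split_ifs
    · have := cancel_length_le o c t; simp; omega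
    · have := cancel_length_le o c (y :: t); simp at this ⊢; omega

lemma cancel_eq_of_length (o c : Char) : ∀ cs : List Char,
    (cancel o c cs).length = cs.length → cancel o c cs = cs
  | [] => by simp [cancel]
  | [x] => by simp [cancel]
  | x :: y :: t => by
    simp only [cancel]
    split_ifs with hm
    · intro h
      have := cancel_length_le o c t
      simp at h; omega
    · intro h
      have : (cancel o c (y :: t)).length = (y :: t).length := by simp at h ⊢; omega
      rw [cancel_eq_of_length o c (y :: t) this]

-- one round of `for p in ("()", "[]", "{}", "<>"): r = r.replace(p, "")`
def reduceStep (r : List Char) : List Char :=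
  [['(', ')'], ['[', ']'], ['{', '}'], ['<', '>']].foldl
    (fun r p => PySem.Chars.replace r p []) r

lemma reduceStep_eq (r : List Char) :
    reduceStep r = cancel '<' '>' (cancel '{' '}' (cancel '[' ']' (cancel '(' ')' r))) := by
  simp [reduceStep, replace_eq_cancel]

lemma reduceStep_lt {r : List Char} (h : reduceStep r ≠ r) : (reduceStep r).length < r.length := by
  rw [reduceStep_eq] at h ⊢
  have h1 := cancel_length_le '(' ')' r
  have h2 := cancel_length_le '[' ']' (cancel '(' ')' r)
  have h3 := cancel_length_le '{' '}' (cancel '[' ']' (cancel '(' ')' r))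
  have h4 := cancel_length_le '<' '>' (cancel '{' '}' (cancel '[' ']' (cancel '(' ')' r)))
  by_contra hc
  push Not at hc
  have e1 : cancel '(' ')' r = r := cancel_eq_of_length _ _ _ (by omega)
  rw [e1] at h2 h3 h4 h hc
  have e2 : cancel '[' ']' r = r := cancel_eq_of_length _ _ _ (by omega)
  rw [e2] at h3 h4 h hc
  have e3 : cancel '{' '}' r = r := cancel_eq_of_length _ _ _ (by omega)
  rw [e3] at h4 h hc
  have e4 : cancel '<' '>' r = r := cancel_eq_of_length _ _ _ (by omega)
  exact h e4

-- the while-loop: rewrite until one full round changes nothing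
def reduceFix (r : List Char) : List Char :=
  let r' := reduceStep r
  if h : r' = r then r else reduceFix r'
termination_by r.length
decreasing_by exact reduceStep_lt h

def part2_alt (lines : List String) : Int :=
  let scores := lines.foldl (fun scores line =>
    let r := reduceFix line.toList
    -- `ch in "([{<"` is a substring test on a one-char string = char membership
    if !r.isEmpty && r.all (fun ch => PySem.Chars.isIn [ch] ['(', '[', '{', '<']) then
      -- pts[ch] cannot raise KeyError: the guard admits openers only
      scores ++ [r.reverse.foldl (fun score ch => score * 5 + PySem.Dict.getD ptsD ch 0) 0]
    else scores) []
  -- scores.sort(); scores[len(scores) // 2]; B raises the same IndexError outside Pre_part2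
  PySem.List.pyGetD (PySem.List.sorted scores (fun x => x) false)
    (PySem.Int.floordiv (scores.length : Int) 2) 0

-- ===== PRECONDITION & SPEC =====
-- residue of a line after repeatedly cancelling adjacent matched bracket pairs;
-- a line is incomplete exactly when this residue is a non-empty string of openers
def pvDyckReduce (cs : List Char) : List Char :=
  cs.foldl (fun acc c =>
    if (acc.getLast?, c) ∈ [(some '(', ')'), (some '[', ']'), (some '{', '}'), (some '<', '>')]
    then acc.dropLast else acc ++ [c]) []

-- Pre_ excludes exactly the inputs with no incomplete line, on which Python A raises
-- IndexError at sorted(scores)[0] (scores is empty); B raises there too.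
def Pre_part2 (lines : List String) : Prop :=
  (lines.any (fun l => !(pvDyckReduce l.toList).isEmpty &&
    (pvDyckReduce l.toList).all (fun c => c ∈ (['(', '[', '{', '<'] : List Char)))) = true
instance (lines : List String) : Decidable (Pre_part2 lines) := by
  unfold Pre_part2; infer_instance

def pvWitness_part2 : List String := ["(<{["]

def Spec_part2 (lines : List String) (out : Int) : Prop := out = part2_alt lines
instance (lines : List String) (out : Int) : Decidable (Spec_part2 lines out) := by
  unfold Spec_part2; infer_instance

-- ===== CLAIM (what is proved, stated in full; the proofs are below) =====
def Claim_equal_part2 : Prop :=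
  ∀ (lines : List String), Dom_part2 lines → Pre_part2 lines → Spec_part2 lines (part2 lines)

-- ===== LEMMAS AND PROOFS =====

-- abstract classification shared by both proofs: none = corrupted, some st = leftover stack
def isOp (c : Char) : Bool := c == '(' || c == '[' || c == '{' || c == '<'

def matchCl (s c : Char) : Bool :=
  (s == '(' && c == ')') || (s == '[' && c == ']') || (s == '{' && c == '}') || (s == '<' && c == '>')

def scanRes : List Char → List Char → Option (List Char)
  | [], st => some st
  | c :: rest, st =>
    if isOp c then scanRes rest (c :: st)
    else
      match st with
      | [] => none
      | s :: t => if matchCl s c then scanRes rest t else none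

lemma get?_nil {ν : Type} (c : Char) : (PySem.Dict.mk ([] : List (Char × ν))).get? c = none := rfl

lemma cbo_exp (c : Char) : PySem.Dict.get? cboD c =
    if c = '(' then some ')' else if c = '{' then some '}'
    else if c = '[' then some ']' else if c = '<' then some '>' else none := by
  by_cases h1 : c = '(' ; · subst h1; decide
  by_cases h2 : c = '{' ; · subst h2; decide
  by_cases h3 : c = '[' ; · subst h3; decide
  by_cases h4 : c = '<' ; · subst h4; decide
  simp [cboD, PySem.Dict.get?_mk_cons, beq_iff_eq, get?_nil, Ne.symm h1, Ne.symm h2,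
    Ne.symm h3, Ne.symm h4, h1, h2, h3, h4]

lemma open_eq (c : Char) : (PySem.Dict.get? cboD c).isSome = isOp c := by
  rw [cbo_exp]
  unfold isOp
  split_ifs <;> simp_all

lemma mismatch_eq {s : Char} (hs : isOp s = true) (c : Char) :
    ((PySem.Dict.get? cboD s).getD ' ' ≠ c) ↔ (matchCl s c = false) := by
  unfold isOp at hs
  simp only [Bool.or_eq_true, beq_iff_eq] at hs
  obtain ((h | h) | h) | h := hs <;> subst h
  · rw [show (PySem.Dict.get? cboD '(').getD ' ' = ')' from by decide]
    by_cases hc : c = ')'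
    · subst hc; decide
    · simp only [matchCl]
      constructor
      · intro _; simp [hc]
      · intro _ h; exact hc h.symm
  · rw [show (PySem.Dict.get? cboD '[').getD ' ' = ']' from by decide]
    by_cases hc : c = ']'
    · subst hc; decide
    · simp only [matchCl]
      constructor
      · intro _; simp [hc]
      · intro _ h; exact hc h.symm
  · rw [show (PySem.Dict.get? cboD '{').getD ' ' = '}' from by decide]
    by_cases hc : c = '}'
    · subst hc; decide
    · simp only [matchCl]
      constructor
      · intro _; simp [hc]
      · intro _ h; exact hc h.symm
  · rw [show (PySem.Dict.get? cboD '<').getD ' ' = '>' from by decide]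
    by_cases hc : c = '>'
    · subst hc; decide
    · simp only [matchCl]
      constructor
      · intro _; simp [hc]
      · intro _ h; exact hc h.symm

-- A's analyze loop computes the abstract classification (stack invariant: openers only)
lemma scan_analyze (line : String) :
    ∀ (cs stack : List Char), (∀ s ∈ stack, isOp s = true) →
      (match analyzeLoop line cs stack with
        | .incomplete st => some st
        | .valid _ => some []
        | .corrupted _ _ => none) = scanRes cs stack := by
  intro cs
  induction cs with
  | nil =>
    intro stack _
    by_cases h : stack = [] <;> simp [scanRes, analyzeLoop, h]
  | cons c rest ih =>
    intro stack hstack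
    simp only [scanRes, analyzeLoop, ← open_eq c]
    by_cases ho : (PySem.Dict.get? cboD c).isSome = true
    · have hall : ∀ s ∈ c :: stack, isOp s = true := by
        intro s hs
        rcases List.mem_cons.mp hs with h | h
        · subst h; rw [← open_eq]; exact ho
        · exact hstack s h
      simp [ho, ih (c :: stack) hall]
    · simp only [Bool.not_eq_true] at ho
      rw [if_neg (by simp [ho]), if_neg (by simp [ho])]
      match stack with
      | [] => rfl
      | s :: st =>
        have hsop : isOp s = true := hstack s List.mem_cons_self
        have hst : ∀ x ∈ st, isOp x = true := fun x hx => hstack x (List.mem_cons_of_mem _ hx)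
        by_cases hm : (PySem.Dict.get? cboD s).getD ' ' ≠ c
        · have hb : matchCl s c = false := (mismatch_eq hsop c).mp hm
          simp [hm, hb]
        · have hb : ¬ matchCl s c = false := fun h => hm ((mismatch_eq hsop c).mpr h)
          simp only [Bool.not_eq_false] at hb
          simp only [not_not] at hm
          simp [hm, hb, ih st hst]

-- analyzeLoop never reports an empty incomplete stack
lemma analyze_incomplete_ne_nil (line : String) :
    ∀ (cs stack out : List Char), analyzeLoop line cs stack = .incomplete out → out ≠ [] := by
  intro cs
  induction cs with
  | nil =>
    intro stack out heq
    simp only [analyzeLoop] at heq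
    split_ifs at heq with hs
    · cases heq; exact hs
  | cons c rest ih =>
    intro stack out heq
    simp only [analyzeLoop] at heq
    by_cases ho : (PySem.Dict.get? cboD c).isSome = true
    · rw [if_pos ho] at heq
      exact ih _ _ heq
    · rw [if_neg ho] at heq
      match stack with
      | [] => exact AnalyzeRes.noConfusion heq
      | s :: st =>
        simp only at heq
        split_ifs at heq
        · exact ih _ _ heq

-- completeLoop builds acc ++ (closers of the stack, top-first)
lemma completeLoop_eq : ∀ (st acc : List Char),
    completeLoop st acc = acc ++ st.map (fun s => (PySem.Dict.get? cboD s).getD ' ') := by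
  intro st
  induction st with
  | nil => simp [completeLoop]
  | cons c rest ih => intro acc; simp [completeLoop, ih]

-- scoring the completion string (with the closer table) = scoring the stack (opener table)
lemma score_eq (st : List Char) (hst : ∀ s ∈ st, isOp s = true) :
    (completeLoop st []).foldl (fun score char => score * 5 + PySem.Dict.getD pbdD char 0) 0 =
      st.foldl (fun score ch => score * 5 + PySem.Dict.getD ptsD ch 0) 0 := by
  rw [completeLoop_eq, List.nil_append, List.foldl_map]
  apply PySem.List.foldl_congr_mem
  intro acc x hx
  have := hst x hx
  unfold isOp at this
  simp only [Bool.or_eq_true, beq_iff_eq] at this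
  rcases this with ((h | h) | h) | h <;> subst h <;> rfl

-- ----- B-side: cancellation preserves the classification -----

lemma scan_insert {o cl : Char} (hm : matchCl o cl = true) :
    ∀ (u v st : List Char), scanRes (u ++ o :: cl :: v) st = scanRes (u ++ v) st := by
  intro u
  induction u with
  | nil =>
    intro v st
    simp only [List.nil_append]
    unfold matchCl at hm
    simp only [Bool.or_eq_true, Bool.and_eq_true, beq_iff_eq] at hm
    rcases hm with ((⟨rfl, rfl⟩ | ⟨rfl, rfl⟩) | ⟨rfl, rfl⟩) | ⟨rfl, rfl⟩ <;>
      simp [scanRes, isOp, matchCl]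
  | cons a u ih =>
    intro v st
    simp only [List.cons_append, scanRes]
    by_cases ha : isOp a = true
    · simp [ha, ih]
    · simp only [ha, Bool.false_eq_true, if_false]
      match st with
      | [] => rfl
      | s :: t =>
        by_cases hsc : matchCl s a = true
        · simp [hsc, ih]
        · simp [hsc]

lemma cancel_scan_aux {o cl : Char} (hm : matchCl o cl = true) :
    ∀ (n : Nat) (cs : List Char), cs.length ≤ n → ∀ st,
      scanRes (cancel o cl cs) st = scanRes cs st := by
  intro n
  induction n with
  | zero =>
    intro cs h st
    have : cs = [] := List.eq_nil_of_length_eq_zero (Nat.le_zero.mp h)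
    subst this; rfl
  | succ n ih =>
    intro cs h st
    match cs with
    | [] => rfl
    | [x] => rfl
    | x :: y :: t =>
      simp only [cancel]
      split_ifs with hxy
      · obtain ⟨rfl, rfl⟩ := hxy
        rw [ih t (by simp at h; omega) st]
        exact (scan_insert hm [] t st).symm
      · have h1 : scanRes (x :: cancel o cl (y :: t)) st =
            scanRes ([x] ++ cancel o cl (y :: t)) st := rfl
        have h2 : scanRes (x :: y :: t) st = scanRes ([x] ++ y :: t) st := rfl
        rw [h1, h2]
        match st with
        | [] =>
          by_cases hx : isOp x = true
          · simp only [List.cons_append, List.nil_append, scanRes, hx, if_pos]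
            exact ih (y :: t) (by simp at h ⊢; omega) [x]
          · simp [scanRes, hx]
        | s :: st' =>
          by_cases hx : isOp x = true
          · simp only [List.cons_append, List.nil_append, scanRes, hx, if_pos]
            exact ih (y :: t) (by simp at h ⊢; omega) (x :: s :: st')
          · simp only [List.cons_append, List.nil_append, scanRes, hx,
              Bool.false_eq_true, if_false]
            by_cases hsx : matchCl s x = true
            · simp only [hsx, if_pos]
              exact ih (y :: t) (by simp at h ⊢; omega) st'
            · simp [hsx]

lemma cancel_scan {o cl : Char} (hm : matchCl o cl = true) (cs st : List Char) :
    scanRes (cancel o cl cs) st = scanRes cs st :=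
  cancel_scan_aux hm cs.length cs le_rfl st

lemma scanRes_reduceStep (r : List Char) : scanRes (reduceStep r) [] = scanRes r [] := by
  rw [reduceStep_eq]
  rw [cancel_scan (by decide), cancel_scan (by decide), cancel_scan (by decide),
    cancel_scan (by decide)]

lemma reduceFix_spec : ∀ (r : List Char),
    scanRes (reduceFix r) [] = scanRes r [] ∧ reduceStep (reduceFix r) = reduceFix r := by
  intro r
  rw [reduceFix]
  split_ifs with h
  · exact ⟨rfl, h⟩
  · have ih := reduceFix_spec (reduceStep r)
    exact ⟨ih.1.trans (scanRes_reduceStep r), ih.2⟩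
termination_by r => r.length
decreasing_by exact reduceStep_lt h

-- a fixpoint of one full rewrite round is fixed by each of the four cancellations
lemma step_fix_all {r : List Char} (h : reduceStep r = r) :
    ∀ o cl : Char, matchCl o cl = true → cancel o cl r = r := by
  rw [reduceStep_eq] at h
  have h1 := cancel_length_le '(' ')' r
  have h2 := cancel_length_le '[' ']' (cancel '(' ')' r)
  have h3 := cancel_length_le '{' '}' (cancel '[' ']' (cancel '(' ')' r))
  have h4 := cancel_length_le '<' '>' (cancel '{' '}' (cancel '[' ']' (cancel '(' ')' r)))
  have hlen := congrArg List.length h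
  simp only at hlen
  have e1 : cancel '(' ')' r = r := cancel_eq_of_length _ _ _ (by omega)
  rw [e1] at h2 h3 h4 h hlen
  have e2 : cancel '[' ']' r = r := cancel_eq_of_length _ _ _ (by omega)
  rw [e2] at h3 h4 h hlen
  have e3 : cancel '{' '}' r = r := cancel_eq_of_length _ _ _ (by omega)
  rw [e3] at h4 h hlen
  intro o cl hm
  unfold matchCl at hm
  simp only [Bool.or_eq_true, Bool.and_eq_true, beq_iff_eq] at hm
  rcases hm with ((⟨rfl, rfl⟩ | ⟨rfl, rfl⟩) | ⟨rfl, rfl⟩) | ⟨rfl, rfl⟩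
  · exact e1
  · exact e2
  · exact e3
  · exact h

-- a cancel-fixpoint has no adjacent occurrence of its pair
lemma cancel_fix_no_adj {o cl : Char} :
    ∀ cs : List Char, cancel o cl cs = cs → ∀ u v, cs ≠ u ++ o :: cl :: v
  | [] => by
    intro _ u v h
    have := congrArg List.length h
    simp at this
  | [x] => by
    intro _ u v h
    have := congrArg List.length h
    simp at this; omega
  | x :: y :: t => by
    intro h u v
    simp only [cancel] at h
    split_ifs at h with hxy
    · exfalso
      have hl := cancel_length_le o cl t
      have := congrArg List.length h
      simp at this; omega
    · have ht : cancel o cl (y :: t) = y :: t := by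
        injection h with _ h2
      intro hc
      match u with
      | [] =>
        simp only [List.nil_append, List.cons.injEq] at hc
        exact hxy ⟨hc.1, hc.2.1⟩
      | a :: u' =>
        simp only [List.cons_append, List.cons.injEq] at hc
        exact cancel_fix_no_adj (y :: t) ht u' v hc.2

-- scanning an all-opener prefix just pushes it
lemma scan_open_prefix : ∀ (a : List Char), (∀ x ∈ a, isOp x = true) →
    ∀ rest st, scanRes (a ++ rest) st = scanRes rest (a.reverse ++ st) := by
  intro a
  induction a with
  | nil => simp
  | cons x t ih =>
    intro h rest st
    have hx : isOp x = true := h x List.mem_cons_self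
    simp only [List.cons_append, scanRes, hx, if_pos]
    rw [ih (fun y hy => h y (List.mem_cons_of_mem _ hy)) rest (x :: st)]
    simp

lemma scan_all_openers (r : List Char) (h : ∀ x ∈ r, isOp x = true) (st : List Char) :
    scanRes r st = some (r.reverse ++ st) := by
  have := scan_open_prefix r h [] st
  simpa [scanRes] using this

-- an irreducible string containing a non-opener is corrupted
lemma scan_irreducible_none (r : List Char)
    (hirr : ∀ (o cl : Char), matchCl o cl = true → ∀ u v, r ≠ u ++ o :: cl :: v)
    (hcl : ¬ ∀ x ∈ r, isOp x = true) : scanRes r [] = none := by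
  have hsplit : r.takeWhile isOp ++ r.dropWhile isOp = r := List.takeWhile_append_dropWhile
  have hdne : r.dropWhile isOp ≠ [] := by
    intro hnil
    apply hcl
    intro x hx
    rw [← hsplit, hnil, List.append_nil] at hx
    exact List.mem_takeWhile_imp hx
  obtain ⟨cl, b, hdrop⟩ : ∃ cl b, r.dropWhile isOp = cl :: b := by
    match hd : r.dropWhile isOp with
    | [] => exact absurd hd hdne
    | c :: bs => exact ⟨c, bs, rfl⟩
  have hclf : isOp cl = false := by
    have h0 := List.head_dropWhile_not isOp hdne
    have hhead : (r.dropWhile isOp).head hdne = cl := by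
      simp [hdrop]
    rw [hhead] at h0
    exact h0
  have hAop : ∀ x ∈ r.takeWhile isOp, isOp x = true := fun x hx => List.mem_takeWhile_imp hx
  have hscan : scanRes r [] = scanRes (cl :: b) ((r.takeWhile isOp).reverse ++ []) := by
    conv_lhs => rw [← hsplit, hdrop]
    exact scan_open_prefix _ hAop _ _
  rw [hscan, List.append_nil]
  rcases List.eq_nil_or_concat (r.takeWhile isOp) with ha | ⟨a', x, ha⟩
  · rw [ha]
    simp [scanRes, hclf]
  · rw [ha, List.concat_eq_append, List.reverse_append, List.reverse_singleton,
      List.singleton_append]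
    simp only [scanRes, hclf, Bool.false_eq_true, if_false]
    have hmx : matchCl x cl = false := by
      by_contra hmc
      simp only [Bool.not_eq_false] at hmc
      apply hirr x cl hmc a' b
      rw [← hsplit, hdrop, ha]
      simp
    simp [hmx]

-- ----- per-line agreement and plumbing -----

lemma singleton_infix_iff {c : Char} {l : List Char} : [c] <:+: l ↔ c ∈ l := by
  constructor
  · intro h
    exact List.singleton_sublist.mp h.sublist
  · intro h
    obtain ⟨s, t, rfl⟩ := List.append_of_mem h
    exact ⟨s, t, by simp⟩

lemma isIn_single_opens (ch : Char) :
    PySem.Chars.isIn [ch] ['(', '[', '{', '<'] = isOp ch := by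
  by_cases h : ch ∈ (['(', '[', '{', '<'] : List Char)
  · rw [(PySem.Chars.isIn_iff_infix _ _).mpr (singleton_infix_iff.mpr h)]
    simp only [List.mem_cons] at h
    unfold isOp
    rcases h with rfl | rfl | rfl | (rfl | h)
    · rfl
    · rfl
    · rfl
    · rfl
    · exact absurd h (List.not_mem_nil)
  · rw [(PySem.Chars.isIn_eq_false_iff _ _).mpr (fun hinf => h (singleton_infix_iff.mp hinf))]
    unfold isOp
    simp only [List.mem_cons, not_or] at h
    obtain ⟨h1, h2, h3, h4, -⟩ := h
    simp [h1, h2, h3, h4]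

-- per line: A's optional completion, scored, equals B's optional residue score
lemma line_contrib (line : String) :
    (Option.map (fun completion =>
        completion.foldl (fun score char => score * 5 + PySem.Dict.getD pbdD char 0) 0)
      (match analyze line with
        | .incomplete st => some (completeLoop st [])
        | _ => none)) =
    (let r := reduceFix line.toList
     if !r.isEmpty && r.all (fun ch => PySem.Chars.isIn [ch] ['(', '[', '{', '<']) then
       some (r.reverse.foldl (fun score ch => score * 5 + PySem.Dict.getD ptsD ch 0) 0)
     else none) := by
  have hsr : scanRes (reduceFix line.toList) [] = scanRes line.toList [] :=
    (reduceFix_spec line.toList).1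
  have hfix : reduceStep (reduceFix line.toList) = reduceFix line.toList :=
    (reduceFix_spec line.toList).2
  have hclass : (match analyze line with
      | AnalyzeRes.incomplete st => some st
      | AnalyzeRes.valid _ => some []
      | AnalyzeRes.corrupted _ _ => none) = scanRes line.toList [] :=
    scan_analyze line line.toList [] (by simp)
  set r := reduceFix line.toList with hr
  have hguard : (r.all fun ch => PySem.Chars.isIn [ch] ['(', '[', '{', '<']) = r.all isOp := by
    rw [Bool.eq_iff_iff, List.all_eq_true, List.all_eq_true]
    constructor
    · intro h x hx
      rw [← isIn_single_opens]
      exact h x hx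
    · intro h x hx
      rw [isIn_single_opens]
      exact h x hx
  by_cases hrn : r = []
  · -- residue empty: the line is valid; both sides contribute nothing
    have hval : scanRes line.toList [] = some [] := by
      rw [← hsr, hrn]; rfl
    rw [hval] at hclass
    simp only [hrn, List.isEmpty_nil, Bool.not_true, Bool.false_and, Bool.false_eq_true,
      if_false]
    match hA : analyze line with
    | .corrupted e g => simp
    | .valid l => simp
    | .incomplete st =>
      rw [hA] at hclass
      simp only [Option.some.injEq] at hclass
      exact absurd hclass (analyze_incomplete_ne_nil line line.toList [] st hA)
  · by_cases hall : ∀ x ∈ r, isOp x = true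
    · -- residue a non-empty string of openers: the line is incomplete, same score
      have hsome : scanRes line.toList [] = some r.reverse := by
        rw [← hsr, scan_all_openers r hall, List.append_nil]
      rw [hsome] at hclass
      have hguard' : (!r.isEmpty &&
          r.all fun ch => PySem.Chars.isIn [ch] ['(', '[', '{', '<']) = true := by
        rw [hguard, Bool.and_eq_true]
        refine ⟨by simp [hrn], ?_⟩
        rw [List.all_eq_true]
        intro x hx
        exact hall x hx
      simp only [hguard', if_pos]
      match hA : analyze line with
      | .corrupted e g => rw [hA] at hclass; simp at hclass
      | .valid l =>
        rw [hA] at hclass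
        simp only [Option.some.injEq] at hclass
        exact absurd (List.reverse_eq_nil_iff.mp hclass.symm) hrn
      | .incomplete st =>
        rw [hA] at hclass
        simp only [Option.some.injEq] at hclass
        subst hclass
        simp only [Option.map_some, Option.some.injEq]
        exact score_eq r.reverse (by intro x hx; exact hall x (List.mem_reverse.mp hx))
    · -- residue contains a non-opener: the line is corrupted; both contribute nothing
      have hirr : ∀ (o cl : Char), matchCl o cl = true → ∀ u v, r ≠ u ++ o :: cl :: v :=
        fun o cl hm => cancel_fix_no_adj r (step_fix_all hfix o cl hm)
      have hnone : scanRes line.toList [] = none := by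
        rw [← hsr]
        exact scan_irreducible_none r hirr hall
      rw [hnone] at hclass
      have hguard' : (!r.isEmpty &&
          r.all fun ch => PySem.Chars.isIn [ch] ['(', '[', '{', '<']) = false := by
        rw [hguard, Bool.and_eq_false_iff]
        right
        rw [List.all_eq_false]
        push Not at hall
        obtain ⟨x, hx, hnx⟩ := hall
        exact ⟨x, hx, by simp [hnx]⟩
      simp only [hguard', Bool.false_eq_true, if_false]
      match hA : analyze line with
      | .corrupted e g => simp
      | .valid l => rw [hA] at hclass; simp at hclass
      | .incomplete st => rw [hA] at hclass; simp at hclass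

-- A's two loops, flattened
lemma foldA_eq (completions : List (List Char)) : ∀ acc : List Int,
    completions.foldl (fun scores completion =>
      scores ++ [completion.foldl (fun score char => score * 5 + PySem.Dict.getD pbdD char 0) 0]) acc =
    acc ++ completions.map
      (fun completion => completion.foldl (fun score char => score * 5 + PySem.Dict.getD pbdD char 0) 0) := by
  induction completions with
  | nil => simp
  | cons c rest ih => intro acc; simp [ih]

-- B's loop, as a filterMap
lemma foldB_eq (lines : List String) : ∀ acc : List Int,
    lines.foldl (fun scores line =>
      let r := reduceFix line.toList
      if !r.isEmpty && r.all (fun ch => PySem.Chars.isIn [ch] ['(', '[', '{', '<']) then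
        scores ++ [r.reverse.foldl (fun score ch => score * 5 + PySem.Dict.getD ptsD ch 0) 0]
      else scores) acc =
    acc ++ lines.filterMap (fun line =>
      let r := reduceFix line.toList
      if !r.isEmpty && r.all (fun ch => PySem.Chars.isIn [ch] ['(', '[', '{', '<']) then
        some (r.reverse.foldl (fun score ch => score * 5 + PySem.Dict.getD ptsD ch 0) 0)
      else none) := by
  induction lines with
  | nil => simp
  | cons l rest ih =>
    intro acc
    simp only [List.foldl_cons, List.filterMap_cons]
    by_cases h : (!(reduceFix l.toList).isEmpty &&
        (reduceFix l.toList).all (fun ch => PySem.Chars.isIn [ch] ['(', '[', '{', '<'])) = true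
    · simp only [h, if_pos]
      rw [ih]
      simp
    · simp only [Bool.not_eq_true] at h
      simp only [h, Bool.false_eq_true, if_false]
      exact ih acc

-- the two score lists coincide
lemma scores_eq (lines : List String) :
    (lines.filterMap (fun line =>
        match analyze line with
        | .incomplete st => some (completeLoop st [])
        | _ => none)).foldl (fun scores completion =>
          scores ++ [completion.foldl (fun score char => score * 5 + PySem.Dict.getD pbdD char 0) 0]) [] =
    lines.foldl (fun scores line =>
      let r := reduceFix line.toList
      if !r.isEmpty && r.all (fun ch => PySem.Chars.isIn [ch] ['(', '[', '{', '<']) then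
        scores ++ [r.reverse.foldl (fun score ch => score * 5 + PySem.Dict.getD ptsD ch 0) 0]
      else scores) [] := by
  rw [foldA_eq, foldB_eq, List.nil_append, List.nil_append, List.map_filterMap]
  congr 1
  funext line
  exact line_contrib line

-- ===== VERDICT (by name: the statement is the Claim_ definition above) =====
theorem part2_spec : Claim_equal_part2 := by
  intro lines _ _
  unfold Spec_part2 part2 part2_alt
  simp only []
  rw [scores_eq]
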